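-- pv_equiv track=rewrite | github.com/distbit0/todoListManagement | utils/routines.py | sortRoutinesToTop
-- ===== SOURCE A (Python) =====
-- def sortRoutinesToTop(paths):
--     outputPaths = []
--     routines = []
--     for path in paths:
--         if "Routine" in path or "Distraction" in path:
--             routines.append(path)
--         else:
--             outputPaths.append(path)
--     routines.sort()
--     routines.extend(outputPaths)
--     return routines
-- ===== SOURCE B (Python) =====
-- def sortRoutinesToTop(paths):
--     def key(p):
--         if "Routine" in p or "Distraction" in p:
--             return (0, p)
--         return (1, "")
--     return sorted(paths, key=key)
-- ===== Notes on version B (the rewrite author's own statement) =====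
-- stated objective: idiomatic
-- what changed: Replaces the manual partition-into-two-lists + list.sort + extend with a single stable sorted() call over a composite key ((0, path) for routine/distraction paths, (1, '') otherwise), relying on sort stability to keep non-routine paths in their original order.
import Mathlib
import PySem

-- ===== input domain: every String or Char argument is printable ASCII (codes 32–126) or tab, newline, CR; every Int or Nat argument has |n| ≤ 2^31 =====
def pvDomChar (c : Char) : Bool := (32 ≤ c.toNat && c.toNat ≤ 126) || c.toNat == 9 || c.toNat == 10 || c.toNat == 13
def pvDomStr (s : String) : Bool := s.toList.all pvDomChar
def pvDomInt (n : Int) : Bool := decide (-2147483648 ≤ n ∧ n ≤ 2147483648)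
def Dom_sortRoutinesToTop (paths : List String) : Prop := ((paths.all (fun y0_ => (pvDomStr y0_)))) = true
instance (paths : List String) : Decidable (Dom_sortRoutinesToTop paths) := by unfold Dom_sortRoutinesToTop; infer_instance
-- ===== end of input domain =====

-- B replaces A's partition + sort + concatenate with one stable sorted() over a composite key; same behaviour, more idiomatic.


-- ===== PORT A =====
-- '"Routine" in path or "Distraction" in path' (shared by both Pythons)
def pvIsRoutine (path : String) : Bool :=
  PySem.Str.isIn "Routine" path || PySem.Str.isIn "Distraction" path

-- literal port of A: build (outputPaths, routines) in one pass, sort routines, extend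
def sortRoutinesToTop (paths : List String) : List String :=
  let st := paths.foldl
    (fun (acc : List String × List String) path =>
      if pvIsRoutine path then (acc.1, acc.2 ++ [path]) else (acc.1 ++ [path], acc.2))
    ([], [])
  PySem.List.sorted st.2 (fun x => x) false ++ st.1

-- ===== PORT B =====
-- key(p) = (0, p) if routine/distraction else (1, "")
def pvKey1 (p : String) : Int := if pvIsRoutine p then 0 else 1
def pvKey2 (p : String) : String := if pvIsRoutine p then p else ""

-- literal port of B: one stable sort with the tuple key
def sortRoutinesToTop_alt (paths : List String) : List String :=
  PySem.List.sorted2 paths pvKey1 pvKey2 false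

-- ===== PRECONDITION & SPEC =====
def Spec_sortRoutinesToTop (paths : List String) (out : List String) : Prop := out = sortRoutinesToTop_alt paths
instance (paths : List String) (out : List String) : Decidable (Spec_sortRoutinesToTop paths out) := by unfold Spec_sortRoutinesToTop; infer_instance

-- ===== CLAIM (what is proved, stated in full; the proofs are below) =====
def Claim_equal_sortRoutinesToTop : Prop := ∀ (paths : List String), Dom_sortRoutinesToTop paths → Spec_sortRoutinesToTop paths (sortRoutinesToTop paths)

-- ===== LEMMAS AND PROOFS =====

-- B's comparison function after unfolding sorted2 (reverse = false)
def pvBefore (a b : String) : Bool :=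
  decide (pvKey1 a < pvKey1 b) || (!decide (pvKey1 b < pvKey1 a) && decide (pvKey2 a < pvKey2 b))

theorem pvAlt_eq_foldl (paths : List String) :
    sortRoutinesToTop_alt paths =
      paths.foldl (fun acc x => PySem.List.insertBy pvBefore x acc) [] := rfl

-- insertBy passes over a suffix whose elements all compare 'after' x … actually: if x goes before
-- every element of l2, inserting into l1 ++ l2 is inserting into l1.
theorem pvInsertBy_append_all_before (before : String → String → Bool) (x : String)
    (l1 l2 : List String) (h : ∀ y ∈ l2, before x y = true) :
    PySem.List.insertBy before x (l1 ++ l2) = PySem.List.insertBy before x l1 ++ l2 := by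
  induction l1 with
  | nil =>
    cases l2 with
    | nil => rfl
    | cons z zs => simp [PySem.List.insertBy, h z (by simp)]
  | cons a l1 ih =>
    simp only [List.cons_append, PySem.List.insertBy]
    by_cases hb : before x a = true
    · simp [hb]
    · simp [hb, ih]

theorem pvInsertBy_congr (before1 before2 : String → String → Bool) (x : String)
    (l : List String) (h : ∀ y ∈ l, before1 x y = before2 x y) :
    PySem.List.insertBy before1 x l = PySem.List.insertBy before2 x l := by
  induction l with
  | nil => rfl
  | cons a l ih =>
    simp only [PySem.List.insertBy]
    rw [h a (by simp)]
    by_cases hb : before2 x a = true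
    · simp [hb]
    · simp [hb, ih (fun y hy => h y (by simp [hy]))]

-- inserting x at the end of the sorted inputs = sorting inputs ++ [x]
theorem pvSorted_snoc (r : List String) (x : String) :
    PySem.List.insertBy (fun a b => decide (a < b)) x (PySem.List.sorted r (fun y => y) false) =
      PySem.List.sorted (r ++ [x]) (fun y => y) false := by
  rw [PySem.List.sorted_eq_foldl_insertBy, PySem.List.sorted_eq_foldl_insertBy, List.foldl_append]
  rfl

theorem pvBefore_routine_nonroutine (x y : String) (hx : pvIsRoutine x = true)
    (hy : pvIsRoutine y = false) : pvBefore x y = true := by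
  simp [pvBefore, pvKey1, hx, hy]

theorem pvBefore_routine_routine (x y : String) (hx : pvIsRoutine x = true)
    (hy : pvIsRoutine y = true) : pvBefore x y = decide (x < y) := by
  simp [pvBefore, pvKey1, pvKey2, hx, hy]

theorem pvBefore_nonroutine (x y : String) (hx : pvIsRoutine x = false) :
    pvBefore x y = false := by
  by_cases hy : pvIsRoutine y = true
  · simp [pvBefore, pvKey1, pvKey2, hx, hy]
  · simp at hy
    simp [pvBefore, pvKey1, pvKey2, hx, hy]

-- A's accumulator characterised: the two lists are the two filters, appended to the seed
theorem pvFoldlA (paths : List String) (o r : List String) :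
    paths.foldl
      (fun (acc : List String × List String) path =>
        if pvIsRoutine path then (acc.1, acc.2 ++ [path]) else (acc.1 ++ [path], acc.2))
      (o, r)
    = (o ++ paths.filter (fun p => !pvIsRoutine p), r ++ paths.filter pvIsRoutine) := by
  induction paths generalizing o r with
  | nil => simp
  | cons x xs ih =>
    by_cases hx : pvIsRoutine x = true
    · simp [hx, ih]
    · simp at hx
      simp [hx, ih]

-- Main loop invariant for B's insertion sort: the accumulator stays in the shape
-- 'sorted routines so far ++ non-routines so far in order'.
theorem pvMain (paths : List String) (r o : List String)
    (hr : ∀ y ∈ r, pvIsRoutine y = true) (ho : ∀ y ∈ o, pvIsRoutine y = false) :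
    paths.foldl (fun acc x => PySem.List.insertBy pvBefore x acc)
      (PySem.List.sorted r (fun y => y) false ++ o)
    = PySem.List.sorted (r ++ paths.filter pvIsRoutine) (fun y => y) false ++
        (o ++ paths.filter (fun p => !pvIsRoutine p)) := by
  induction paths generalizing r o with
  | nil => simp
  | cons x xs ih =>
    by_cases hx : pvIsRoutine x = true
    · have step : PySem.List.insertBy pvBefore x (PySem.List.sorted r (fun y => y) false ++ o)
          = PySem.List.sorted (r ++ [x]) (fun y => y) false ++ o := by
        rw [pvInsertBy_append_all_before pvBefore x _ o
            (fun y hy => pvBefore_routine_nonroutine x y hx (ho y hy))]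
        rw [pvInsertBy_congr pvBefore (fun a b => decide (a < b)) x _
            (fun y hy => pvBefore_routine_routine x y hx
              (hr y ((PySem.List.mem_sorted r (fun z => z) false y).mp hy)))]
        rw [pvSorted_snoc]
      simp only [List.foldl_cons, step]
      have hr' : ∀ y ∈ r ++ [x], pvIsRoutine y = true := by
        intro y hy
        rcases List.mem_append.mp hy with h | h
        · exact hr y h
        · simp at h; subst h; exact hx
      rw [ih (r ++ [x]) o hr' ho]
      simp [hx]
    · simp at hx
      have step : PySem.List.insertBy pvBefore x (PySem.List.sorted r (fun y => y) false ++ o)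
          = PySem.List.sorted r (fun y => y) false ++ (o ++ [x]) := by
        rw [PySem.List.insertBy_of_forall_not_before pvBefore x _
            (fun y _ => pvBefore_nonroutine x y hx)]
        simp
      simp only [List.foldl_cons, step]
      have ho' : ∀ y ∈ o ++ [x], pvIsRoutine y = false := by
        intro y hy
        rcases List.mem_append.mp hy with h | h
        · exact ho y h
        · simp at h; subst h; exact hx
      rw [ih r (o ++ [x]) hr ho']
      simp [hx]

-- ===== VERDICT (by name: the statement is the Claim_ definition above) =====
theorem sortRoutinesToTop_spec : Claim_equal_sortRoutinesToTop := by
  intro paths _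
  show sortRoutinesToTop paths = sortRoutinesToTop_alt paths
  rw [pvAlt_eq_foldl]
  have hB := pvMain paths [] [] (by simp) (by simp)
  rw [show (PySem.List.sorted ([] : List String) (fun y => y) false) = [] from rfl] at hB
  simp only [List.nil_append, List.append_nil] at hB
  simp only [sortRoutinesToTop, pvFoldlA paths [] []]
  simp only [List.nil_append]
  rw [hB]
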